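-- pv_equiv track=rewrite | github.com/bsinger-cmu/perry-caldera | loc.py | count_saved_knowledge_lines
-- ===== SOURCE A (Python) =====
-- def count_saved_knowledge_lines(lines, knowledge_actions):
--     total_saved_lines = 0
--
--     high_level_action_calls = {}
--     for key, _ in knowledge_actions.items():
--         high_level_action_calls[key] = 0
--
--     for line in lines:
--         for key, value in knowledge_actions.items():
--             if key in line:
--                 total_saved_lines += value
--                 high_level_action_calls[key] += 1
--                 break
--     return total_saved_lines
-- ===== SOURCE B (Python) =====
-- def count_saved_knowledge_lines(lines, knowledge_actions):
--     # Key-major pass: for each key (in dict order) count the still-unclaimed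
--     # lines it matches, add value * count, and drop those lines from the pool.
--     total = 0
--     remaining = list(lines)
--     for key, value in knowledge_actions.items():
--         matched = [ln for ln in remaining if key in ln]
--         total += value * len(matched)
--         remaining = [ln for ln in remaining if key not in ln]
--     return total
-- ===== Notes on version B (the rewrite author's own statement) =====
-- stated objective: alternative
-- what changed: Line-major scan with an inner break over keys is replaced by a key-major pass that, for each key in dict order, counts the still-unmatched lines containing it, adds value*count, and removes them from the pool; the per-key call dict A builds but never uses is dropped.
import Mathlib
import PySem

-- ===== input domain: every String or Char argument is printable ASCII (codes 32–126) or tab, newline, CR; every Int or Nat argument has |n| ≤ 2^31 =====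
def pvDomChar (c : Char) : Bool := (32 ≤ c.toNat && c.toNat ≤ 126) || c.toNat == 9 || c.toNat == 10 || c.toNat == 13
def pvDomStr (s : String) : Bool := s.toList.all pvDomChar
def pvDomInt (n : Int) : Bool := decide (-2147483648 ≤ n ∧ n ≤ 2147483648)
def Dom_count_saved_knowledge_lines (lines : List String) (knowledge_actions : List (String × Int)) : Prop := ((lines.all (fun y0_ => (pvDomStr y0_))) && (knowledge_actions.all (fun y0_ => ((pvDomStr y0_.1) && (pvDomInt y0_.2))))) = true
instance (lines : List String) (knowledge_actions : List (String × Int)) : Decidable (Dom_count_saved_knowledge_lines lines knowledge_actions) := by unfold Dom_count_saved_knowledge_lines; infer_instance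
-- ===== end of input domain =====

-- B replaces A's line-major scan (inner break over keys) by a key-major pass over a
-- shrinking pool of unmatched lines; equal return value, A's unused call-count dict dropped.

-- ===== PORT A =====
-- inner 'for key, value in knowledge_actions.items(): … break' over state (total, calls)
def pvAInner (line : String) : List (String × Int) → Int × PySem.Dict String Int → Int × PySem.Dict String Int
  | [], st => st
  | (key, value) :: rest, (total, calls) =>
    if PySem.Str.isIn key line then (total + value, calls.modify key 0 (· + 1))
    else pvAInner line rest (total, calls)

def count_saved_knowledge_lines (lines : List String) (knowledge_actions : List (String × Int)) : Int :=
  let calls0 : PySem.Dict String Int := knowledge_actions.foldl (fun d p => d.insert p.1 0) PySem.Dict.empty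
  (lines.foldl (fun st line => pvAInner line knowledge_actions st) ((0 : Int), calls0)).1

-- ===== PORT B =====
def pvBLoop : List (String × Int) → List String → Int → Int
  | [], _, total => total
  | (key, value) :: rest, remaining, total =>
    pvBLoop rest (remaining.filter (fun ln => !(PySem.Str.isIn key ln)))
      (total + value * ((remaining.filter (fun ln => PySem.Str.isIn key ln)).length : Int))

def count_saved_knowledge_lines_alt (lines : List String) (knowledge_actions : List (String × Int)) : Int :=
  pvBLoop knowledge_actions lines 0

-- ===== PRECONDITION & SPEC =====
def Spec_count_saved_knowledge_lines (lines : List String) (knowledge_actions : List (String × Int)) (out : Int) : Prop := out = count_saved_knowledge_lines_alt lines knowledge_actions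
instance (lines : List String) (knowledge_actions : List (String × Int)) (out : Int) : Decidable (Spec_count_saved_knowledge_lines lines knowledge_actions out) := by unfold Spec_count_saved_knowledge_lines; infer_instance

-- ===== CLAIM (what is proved, stated in full; the proofs are below) =====
def Claim_equal_count_saved_knowledge_lines : Prop := ∀ (lines : List String) (knowledge_actions : List (String × Int)), Dom_count_saved_knowledge_lines lines knowledge_actions → Spec_count_saved_knowledge_lines lines knowledge_actions (count_saved_knowledge_lines lines knowledge_actions)

-- ===== LEMMAS AND PROOFS =====

-- value contributed by one line: the value of the first key contained in it, else 0
def pvFirstVal (line : String) : List (String × Int) → Int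
  | [] => 0
  | (key, value) :: rest => if PySem.Str.isIn key line then value else pvFirstVal line rest

theorem pvAInner_fst (line : String) (ks : List (String × Int)) (t : Int)
    (d : PySem.Dict String Int) :
    (pvAInner line ks (t, d)).1 = t + pvFirstVal line ks := by
  induction ks generalizing t d with
  | nil => simp [pvAInner, pvFirstVal]
  | cons p rest ih =>
    obtain ⟨key, value⟩ := p
    by_cases h : PySem.Chars.isIn key.toList line.toList = true
    · simp [pvAInner, pvFirstVal, PySem.Str.isIn, h]
    · simp [pvAInner, pvFirstVal, PySem.Str.isIn, h, ih]

theorem pvA_fold (ka : List (String × Int)) (lines : List String) (t : Int)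
    (d : PySem.Dict String Int) :
    (lines.foldl (fun st line => pvAInner line ka st) (t, d)).1
      = t + (lines.map (fun line => pvFirstVal line ka)).sum := by
  induction lines generalizing t d with
  | nil => simp
  | cons l rest ih =>
    have h1 : pvAInner l ka (t, d) = ((pvAInner l ka (t, d)).1, (pvAInner l ka (t, d)).2) := rfl
    simp only [List.foldl_cons]
    rw [h1, ih, pvAInner_fst]
    simp [List.map_cons, List.sum_cons]
    ring

theorem pvFirstVal_sum_cons (key : String) (value : Int) (rest : List (String × Int))
    (lines : List String) :
    (lines.map (fun line => pvFirstVal line ((key, value) :: rest))).sum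
      = value * ((lines.filter (fun ln => PySem.Str.isIn key ln)).length : Int)
        + ((lines.filter (fun ln => !(PySem.Str.isIn key ln))).map
            (fun line => pvFirstVal line rest)).sum := by
  induction lines with
  | nil => simp
  | cons l ls ih =>
    simp only [pvFirstVal, PySem.Str.isIn] at ih
    by_cases h : PySem.Chars.isIn key.toList l.toList = true
    · simp [pvFirstVal, PySem.Str.isIn, h, List.filter_cons, ih]
      ring
    · simp [pvFirstVal, PySem.Str.isIn, h, List.filter_cons, ih]
      ring

theorem pvBLoop_eq (ks : List (String × Int)) (lines : List String) (t : Int) :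
    pvBLoop ks lines t = t + (lines.map (fun line => pvFirstVal line ks)).sum := by
  induction ks generalizing lines t with
  | nil => simp [pvBLoop, pvFirstVal]
  | cons p rest ih =>
    obtain ⟨key, value⟩ := p
    rw [pvBLoop, ih, pvFirstVal_sum_cons]
    ring

-- ===== VERDICT (by name: the statement is the Claim_ definition above) =====
theorem count_saved_knowledge_lines_spec : Claim_equal_count_saved_knowledge_lines := by
  intro lines ka _
  unfold Spec_count_saved_knowledge_lines count_saved_knowledge_lines count_saved_knowledge_lines_alt
  rw [pvBLoop_eq, pvA_fold]
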